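-- pv_equiv track=rewrite | github.com/cvlab-ai/splinter | research/exam-sheets-anonymization/utils.py | find_extreme_squares
-- ===== SOURCE A (Python) =====
-- def find_extreme_squares(squares, image):
--   """
--   Find the square closest to the top left
--   and bottom right corners of the image
--   """
--   nearest_square = None
--   farest_square = None
--   min_distance = float('inf')
--   max_distance = float('-inf')
--   for square in squares:
--       x, y, _, _ = square
--       distance = x + y # L1
--       if distance < min_distance:
--           min_distance = distance
--           nearest_square = square
--       if distance > max_distance:
--           max_distance = distance
--           farest_square = square
--   return nearest_square, farest_square
-- ===== SOURCE B (Python) =====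
-- def find_extreme_squares(squares, image):
--     """
--     Find the square closest to the top left
--     and bottom right corners of the image
--     """
--     key = lambda s: s[0] + s[1]
--     by_near = sorted(squares, key=key)
--     by_far = sorted(squares, key=key, reverse=True)
--     return (by_near[0] if by_near else None), (by_far[0] if by_far else None)
-- ===== Notes on version B (the rewrite author's own statement) =====
-- stated objective: alternative
-- what changed: Replaces A's single fused running-min/max loop with sentinel infinities by two stable sorts on the x+y key (ascending and descending) and taking each sorted list's head; stability makes each head the first extremal element, matching A's strict-comparison tie-breaking.
import Mathlib
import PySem

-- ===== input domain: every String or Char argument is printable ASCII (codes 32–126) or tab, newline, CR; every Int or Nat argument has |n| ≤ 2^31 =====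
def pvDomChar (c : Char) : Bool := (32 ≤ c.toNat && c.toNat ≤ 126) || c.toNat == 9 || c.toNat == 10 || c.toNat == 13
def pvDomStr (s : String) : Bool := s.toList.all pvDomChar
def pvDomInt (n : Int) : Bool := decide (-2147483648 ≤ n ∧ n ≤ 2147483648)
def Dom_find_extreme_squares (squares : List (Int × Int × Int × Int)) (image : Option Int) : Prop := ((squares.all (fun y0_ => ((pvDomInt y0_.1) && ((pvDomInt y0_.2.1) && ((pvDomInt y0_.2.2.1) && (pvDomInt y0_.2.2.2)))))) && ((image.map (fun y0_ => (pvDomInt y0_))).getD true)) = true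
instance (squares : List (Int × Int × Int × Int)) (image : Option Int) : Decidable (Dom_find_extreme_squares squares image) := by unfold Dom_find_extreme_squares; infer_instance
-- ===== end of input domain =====

-- B replaces A's fused running-min/max loop (sentinel ±infinity) by two stable sorts on the
-- x+y key (ascending and descending) and takes each head; stability matches A's first-extreme
-- tie-breaking (return-value equivalence; `image` is unused by both).


-- ===== PORT A =====
-- float('inf') / float('-inf') sentinels are modeled by `none` in an `Option Int`:
-- `distance < inf` and `distance > -inf` are always true, exactly the `none` branches below.
-- One iteration of A's for-loop body over the state (nearest_square, farest_square, min_distance, max_distance):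
def find_extreme_squares_loopStep
    (st : Option (Int × Int × Int × Int) × Option (Int × Int × Int × Int) × Option Int × Option Int)
    (square : Int × Int × Int × Int) :
    Option (Int × Int × Int × Int) × Option (Int × Int × Int × Int) × Option Int × Option Int :=
  let (nearest, farest, minD, maxD) := st
  let distance := square.1 + square.2.1
  let (minD, nearest) :=
    match minD with
    | none => (some distance, some square)
    | some m => if distance < m then (some distance, some square) else (some m, nearest)
  let (maxD, farest) :=
    match maxD with
    | none => (some distance, some square)
    | some m => if distance > m then (some distance, some square) else (some m, farest)
  (nearest, farest, minD, maxD)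

def find_extreme_squares (squares : List (Int × Int × Int × Int)) (image : Option Int) : (Option (Int × Int × Int × Int)) × (Option (Int × Int × Int × Int)) :=
  let st := squares.foldl find_extreme_squares_loopStep (none, none, none, none)
  (st.1, st.2.1)

-- ===== PORT B =====
def find_extreme_squares_alt (squares : List (Int × Int × Int × Int)) (image : Option Int) : (Option (Int × Int × Int × Int)) × (Option (Int × Int × Int × Int)) :=
  let key := fun (s : Int × Int × Int × Int) => s.1 + s.2.1
  let byNear := PySem.List.sorted squares key false
  let byFar := PySem.List.sorted squares key true
  (byNear.head?, byFar.head?)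

-- ===== PRECONDITION & SPEC =====
def Spec_find_extreme_squares (squares : List (Int × Int × Int × Int)) (image : Option Int) (out : (Option (Int × Int × Int × Int)) × (Option (Int × Int × Int × Int))) : Prop := out = find_extreme_squares_alt squares image
instance (squares : List (Int × Int × Int × Int)) (image : Option Int) (out : (Option (Int × Int × Int × Int)) × (Option (Int × Int × Int × Int))) : Decidable (Spec_find_extreme_squares squares image out) := by unfold Spec_find_extreme_squares; infer_instance

-- ===== CLAIM (what is proved, stated in full; the proofs are below) =====
def Claim_equal_find_extreme_squares : Prop := ∀ (squares : List (Int × Int × Int × Int)) (image : Option Int), Dom_find_extreme_squares squares image → Spec_find_extreme_squares squares image (find_extreme_squares squares image)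

-- ===== LEMMAS AND PROOFS =====

def pvKey (s : Int × Int × Int × Int) : Int := s.1 + s.2.1

def pvMinStep (acc : Option (Int × Int × Int × Int)) (x : Int × Int × Int × Int) : Option (Int × Int × Int × Int) :=
  match acc with
  | none => some x
  | some m => if pvKey x < pvKey m then some x else some m

def pvMaxStep (acc : Option (Int × Int × Int × Int)) (x : Int × Int × Int × Int) : Option (Int × Int × Int × Int) :=
  match acc with
  | none => some x
  | some m => if pvKey m < pvKey x then some x else some m

-- One step of A's fused loop, on a state whose distance components are the keys of its
-- square components, is the pair of independent min/max steps.
theorem pv_step_spec (n f : Option (Int × Int × Int × Int)) (x : Int × Int × Int × Int) :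
    find_extreme_squares_loopStep (n, f, n.map pvKey, f.map pvKey) x
    = (pvMinStep n x, pvMaxStep f x, (pvMinStep n x).map pvKey, (pvMaxStep f x).map pvKey) := by
  cases n <;> cases f <;>
    simp only [find_extreme_squares_loopStep, pvMinStep, pvMaxStep, pvKey, Option.map,
      gt_iff_lt] <;>
    split_ifs <;> simp_all

-- A's fused loop computes the two independent min/max folds.
theorem pv_loop_spec (l : List (Int × Int × Int × Int)) :
    ∀ (n f : Option (Int × Int × Int × Int)),
    l.foldl find_extreme_squares_loopStep (n, f, n.map pvKey, f.map pvKey)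
    = (l.foldl pvMinStep n, l.foldl pvMaxStep f,
       (l.foldl pvMinStep n).map pvKey, (l.foldl pvMaxStep f).map pvKey) := by
  induction l with
  | nil => intro n f; rfl
  | cons x t ih =>
    intro n f
    rw [List.foldl_cons, pv_step_spec, List.foldl_cons, List.foldl_cons]
    exact ih (pvMinStep n x) (pvMaxStep f x)

-- Inserting x into acc changes the head exactly as one min step on the head (ascending order).
theorem pv_head_insert_min (x : Int × Int × Int × Int) (acc : List (Int × Int × Int × Int)) :
    (PySem.List.insertBy (fun a b => decide (pvKey a < pvKey b)) x acc).head?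
    = pvMinStep acc.head? x := by
  cases acc with
  | nil => rfl
  | cons y ys =>
    simp only [PySem.List.insertBy, pvMinStep]
    split_ifs with h h' h' <;> simp_all

-- Inserting x into acc changes the head exactly as one max step on the head (descending order).
theorem pv_head_insert_max (x : Int × Int × Int × Int) (acc : List (Int × Int × Int × Int)) :
    (PySem.List.insertBy (fun a b => decide (pvKey b < pvKey a)) x acc).head?
    = pvMaxStep acc.head? x := by
  cases acc with
  | nil => rfl
  | cons y ys =>
    simp only [PySem.List.insertBy, pvMaxStep]
    split_ifs with h h' h' <;> simp_all

-- The head of the insertion-sort fold is the first-min fold of the heads.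
theorem pv_head_sort_min (l : List (Int × Int × Int × Int)) :
    ∀ (acc : List (Int × Int × Int × Int)),
    (l.foldl (fun acc x => PySem.List.insertBy (fun a b => decide (pvKey a < pvKey b)) x acc) acc).head?
    = l.foldl pvMinStep acc.head? := by
  induction l with
  | nil => intro acc; rfl
  | cons x t ih =>
    intro acc
    rw [List.foldl_cons, List.foldl_cons, ih, pv_head_insert_min]

-- The head of the reverse insertion-sort fold is the first-max fold of the heads.
theorem pv_head_sort_max (l : List (Int × Int × Int × Int)) :
    ∀ (acc : List (Int × Int × Int × Int)),
    (l.foldl (fun acc x => PySem.List.insertBy (fun a b => decide (pvKey b < pvKey a)) x acc) acc).head?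
    = l.foldl pvMaxStep acc.head? := by
  induction l with
  | nil => intro acc; rfl
  | cons x t ih =>
    intro acc
    rw [List.foldl_cons, List.foldl_cons, ih, pv_head_insert_max]

-- ===== VERDICT (by name: the statement is the Claim_ definition above) =====
theorem find_extreme_squares_spec : Claim_equal_find_extreme_squares := by
  intro squares image _
  unfold Spec_find_extreme_squares find_extreme_squares find_extreme_squares_alt
  have h := pv_loop_spec squares none none
  simp only [Option.map_none] at h
  rw [h]
  show (List.foldl pvMinStep none squares, List.foldl pvMaxStep none squares)
      = ((PySem.List.sorted squares pvKey false).head?, (PySem.List.sorted squares pvKey true).head?)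
  rw [PySem.List.sorted_eq_foldl_insertBy, PySem.List.sorted_rev_eq_foldl_insertBy]
  rw [pv_head_sort_min, pv_head_sort_max]
  rfl
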